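-- pv_equiv track=rewrite | github.com/mtzgroup/ff-optimizer | ff_optimizer/setup.py | readCharges
-- ===== SOURCE A (Python) =====
-- def readCharges(lines):
--     """
--     Reads charges from lines of a TeraChem RESP output file.
--
--     Args:
--         lines (list[str]): lines of a TC RESP file
--     Returns:
--         charges (list[str]): RESP charges from TC output
--     """
--
--     charges = []
--     i = 0
--     for line in lines:
--         if "ESP restrained charges:" in line:
--             break
--         i = i + 1
--     for line in lines[i+3:]:
--         if "-----------------------------------------------------------" in line:
--             break
--         splitLine = line.split()
--         charges.append(splitLine[4])
--     return charges
-- ===== SOURCE B (Python) =====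
-- def readCharges(lines):
--     """
--     Reads charges from lines of a TeraChem RESP output file.
--     Single stateful pass: search for the header, skip two lines, then collect
--     until the dashed delimiter.
--     """
--     charges = []
--     collecting = False
--     skip = 0
--     for line in lines:
--         if not collecting:
--             if "ESP restrained charges:" in line:
--                 collecting = True
--                 skip = 2
--         elif skip > 0:
--             skip -= 1
--         else:
--             if "-----------------------------------------------------------" in line:
--                 break
--             charges.append(line.split()[4])
--     return charges
-- ===== Notes on version B (the rewrite author's own statement) =====
-- stated objective: simpler
-- what changed: Replaced A's two sequential loops (index-counting header search, then a slice scan from i+3) with a single stateful pass over the lines using a collecting flag and a two-line skip counter, so no index arithmetic or re-slicing is needed.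
import Mathlib
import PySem

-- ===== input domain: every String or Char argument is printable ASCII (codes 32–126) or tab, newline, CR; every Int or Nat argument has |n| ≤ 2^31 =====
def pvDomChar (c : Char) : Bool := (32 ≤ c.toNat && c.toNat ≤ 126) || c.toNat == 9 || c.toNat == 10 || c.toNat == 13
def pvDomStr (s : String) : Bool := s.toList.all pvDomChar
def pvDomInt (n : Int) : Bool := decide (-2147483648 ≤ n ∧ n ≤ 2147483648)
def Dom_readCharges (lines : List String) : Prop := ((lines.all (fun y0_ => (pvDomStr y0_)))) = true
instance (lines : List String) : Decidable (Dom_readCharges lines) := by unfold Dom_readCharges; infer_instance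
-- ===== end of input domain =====

-- B rewrites A's two sequential loops as a single stateful pass (flag + skip counter); same O(n) cost, simpler control flow.

-- ===== PORT A =====
-- "ESP restrained charges:" in line
def hdrIn (s : String) : Bool := PySem.Str.isIn "ESP restrained charges:" s
-- the 59-dash delimiter substring test
def dashIn (s : String) : Bool := PySem.Str.isIn "-----------------------------------------------------------" s

-- first loop of A: count lines until the header (i = len if absent)
def findI_A : List String → Nat
  | [] => 0
  | l :: ls => if hdrIn l then 0 else findI_A ls + 1

-- second loop of A: collect split()[4] until the dashed line; splitLine[4] is
-- pyGet? (none = IndexError, excluded by Pre_; getD "" is never reached inside Pre_)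
def collect_A : List String → List String
  | [] => []
  | l :: ls =>
    if dashIn l then []
    else ((PySem.List.pyGet? (PySem.Str.split₀ l) 4).getD "") :: collect_A ls

-- lines[i+3:] with i+3 ≥ 0 is List.drop (PySem.List.slice_from_natCast)
def readCharges (lines : List String) : List String :=
  collect_A (lines.drop (findI_A lines + 3))

-- ===== PORT B =====
-- one pass with state (collecting flag, skip counter, accumulator appended to in order)
def altGo : List String → Bool → Nat → List String → List String
  | [], _, _, acc => acc.reverse
  | l :: ls, collecting, skip, acc =>
    if collecting = false then
      if PySem.Str.isIn "ESP restrained charges:" l then altGo ls true 2 acc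
      else altGo ls false skip acc
    else if 0 < skip then altGo ls true (skip - 1) acc
    else if PySem.Str.isIn "-----------------------------------------------------------" l then acc.reverse
    else altGo ls true skip (((PySem.List.pyGet? (PySem.Str.split₀ l) 4).getD "") :: acc)

def readCharges_alt (lines : List String) : List String :=
  altGo lines false 0 []

-- ===== PRECONDITION & SPEC =====
-- Pre_ excludes inputs where some collected line (after the header + 2 skipped lines,
-- before the dashed delimiter) has fewer than 5 whitespace tokens: both A and B raise
-- IndexError there.
def Pre_readCharges (lines : List String) : Prop :=
  ∀ l ∈ (((lines.dropWhile (fun s => !(PySem.Str.isIn "ESP restrained charges:" s))).drop 3).takeWhile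
          (fun s => !(PySem.Str.isIn "-----------------------------------------------------------" s))),
    5 ≤ (PySem.Str.split₀ l).length
instance (lines : List String) : Decidable (Pre_readCharges lines) := by unfold Pre_readCharges; infer_instance

def pvWitness_readCharges : List String :=
  ["ESP restrained charges:", "header1", "header2", "1 C 0.0 0.0 -0.123",
   "-----------------------------------------------------------"]

def Spec_readCharges (lines : List String) (out : List String) : Prop := out = readCharges_alt lines
instance (lines : List String) (out : List String) : Decidable (Spec_readCharges lines out) := by unfold Spec_readCharges; infer_instance

-- ===== CLAIM (what is proved, stated in full; the proofs are below) =====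
def Claim_equal_readCharges : Prop := ∀ (lines : List String), Dom_readCharges lines → Pre_readCharges lines → Spec_readCharges lines (readCharges lines)

-- ===== LEMMAS AND PROOFS =====

-- once skipping/collecting, B equals A's second loop on the remaining suffix
theorem altGo_skip (ls : List String) : ∀ (skip : Nat) (acc : List String),
    altGo ls true skip acc = acc.reverse ++ collect_A (ls.drop skip) := by
  induction ls with
  | nil => intro skip acc; simp [altGo, collect_A]
  | cons l ls ih =>
    intro skip acc
    cases skip with
    | zero =>
      simp only [altGo, collect_A, List.drop_zero]
      rw [if_neg (by simp), if_neg (by simp)]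
      by_cases h : dashIn l
      · rw [if_pos (by simpa [dashIn] using h), if_pos h]; simp
      · rw [if_neg (by simpa [dashIn] using h), if_neg h, ih 0]; simp
    | succ k =>
      simp only [altGo, Nat.succ_sub_one, List.drop_succ_cons]
      rw [if_neg (by simp), if_pos (Nat.succ_pos k)]
      exact ih k acc

-- while searching, B equals A's header-index + slice formulation
theorem altGo_search (ls : List String) : ∀ (acc : List String),
    altGo ls false 0 acc = acc.reverse ++ collect_A (ls.drop (findI_A ls + 3)) := by
  induction ls with
  | nil => intro acc; simp [altGo, collect_A]
  | cons l ls ih =>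
    intro acc
    simp only [altGo, findI_A]
    by_cases h : hdrIn l
    · rw [if_pos trivial, if_pos (by simpa [hdrIn] using h), altGo_skip, if_pos h]
      rfl
    · rw [if_pos trivial, if_neg (by simpa [hdrIn] using h), if_neg h, ih]
      have : findI_A ls + 1 + 3 = (findI_A ls + 3) + 1 := by omega
      rw [this, List.drop_succ_cons]

-- ===== VERDICT (by name: the statement is the Claim_ definition above) =====
theorem readCharges_spec : Claim_equal_readCharges := by
  intro lines _ _
  unfold Spec_readCharges readCharges readCharges_alt
  rw [altGo_search]
  simp
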